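-- pv_equiv track=rewrite | github.com/Vamshi900/VoiceAgent | services/api/app/core/logging.py | _mask_phone_numbers
-- ===== SOURCE A (Python) =====
-- def _mask_phone_numbers(text: str) -> str:
--     # Simple E.164-like masking for logs.
--     out = []
--     cur = ""
--     for ch in text:
--         if ch.isdigit() or ch == "+":
--             cur += ch
--             continue
--         if cur:
--             out.append(_mask_token(cur))
--             cur = ""
--         out.append(ch)
--     if cur:
--         out.append(_mask_token(cur))
--     return "".join(out)
--
-- def _mask_token(token: str) -> str:
--     digits = token.replace("+", "")
--     if len(digits) < 8:
--         return token
--     return f"***{digits[-4:]}"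
-- ===== SOURCE B (Python) =====
-- def _mask_phone_numbers(text: str) -> str:
--     # Index-based run extraction: find each maximal run of phone chars with a
--     # two-pointer scan and mask it in place; no character accumulator, no flush sites.
--     pieces = []
--     i, n = 0, len(text)
--     while i < n:
--         ch = text[i]
--         if ch.isdigit() or ch == "+":
--             j = i + 1
--             while j < n and (text[j].isdigit() or text[j] == "+"):
--                 j += 1
--             run = text[i:j]
--             digits = run.replace("+", "")
--             pieces.append(run if len(digits) < 8 else "***" + digits[-4:])
--             i = j
--         else:
--             pieces.append(ch)
--             i += 1
--     return "".join(pieces)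
-- ===== Notes on version B (the rewrite author's own statement) =====
-- stated objective: alternative
-- what changed: Replaces A's character-accumulator loop with two flush sites by a two-pointer scan that extracts each maximal phone-char run directly and masks it in place, with the masking helper inlined.
import Mathlib
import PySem

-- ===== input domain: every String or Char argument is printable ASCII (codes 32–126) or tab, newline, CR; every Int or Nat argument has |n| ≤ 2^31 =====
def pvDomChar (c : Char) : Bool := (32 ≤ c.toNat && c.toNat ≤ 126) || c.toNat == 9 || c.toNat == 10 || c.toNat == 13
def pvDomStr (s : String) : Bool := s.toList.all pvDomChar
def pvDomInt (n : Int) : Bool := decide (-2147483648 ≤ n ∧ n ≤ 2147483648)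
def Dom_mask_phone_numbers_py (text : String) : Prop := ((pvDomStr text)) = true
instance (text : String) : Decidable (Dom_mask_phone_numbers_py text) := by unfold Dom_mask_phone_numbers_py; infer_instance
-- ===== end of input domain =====

-- B replaces A's character-accumulator loop (with two flush sites) by a two-pointer
-- maximal-run extraction that masks each run in place; same O(n) cost ("alternative").

-- a "phone character" in both programs: ch.isdigit() or ch == '+'
def pvIsPhone (c : Char) : Bool := PySem.Chars.isdigit c || c == '+'

-- ===== PORT A =====
-- _mask_token: token.replace("+","") via Chars.replace; digits[-4:] via Chars.slice
def pvMaskTokenA (token : List Char) : List Char :=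
  let digits := PySem.Chars.replace token ['+'] []
  if digits.length < 8 then token
  else '*' :: '*' :: '*' :: PySem.Chars.slice digits (some (-4)) none

-- the for-loop of A, state = (out, cur); out kept flat since "".join concatenates
def pvGoA : List Char → List Char → List Char → List Char
  | [], out, cur => if cur ≠ [] then out ++ pvMaskTokenA cur else out
  | c :: rest, out, cur =>
      if pvIsPhone c then pvGoA rest out (cur ++ [c])
      else if cur ≠ [] then pvGoA rest (out ++ pvMaskTokenA cur ++ [c]) []
      else pvGoA rest (out ++ [c]) []

def mask_phone_numbers_py (text : String) : String :=
  String.mk (pvGoA text.toList [] [])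

-- ===== PORT B =====
-- the inlined masking of a run (run if len(digits) < 8 else "***" + digits[-4:])
def pvMaskRunB (run : List Char) : List Char :=
  let digits := PySem.Chars.replace run ['+'] []
  if digits.length < 8 then run
  else '*' :: '*' :: '*' :: PySem.Chars.slice digits (some (-4)) none

-- two-pointer scan: text[i:j] with j the end of the maximal phone-char run
def pvGoB : List Char → List Char
  | [] => []
  | c :: rest =>
      if pvIsPhone c then
        pvMaskRunB (c :: rest.takeWhile pvIsPhone) ++ pvGoB (rest.dropWhile pvIsPhone)
      else c :: pvGoB rest
termination_by cs => cs.length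
decreasing_by
  · exact Nat.lt_succ_of_le (List.length_dropWhile_le _ _)
  · simp

def mask_phone_numbers_py_alt (text : String) : String :=
  String.mk (pvGoB text.toList)

-- ===== PRECONDITION & SPEC =====
def Spec_mask_phone_numbers_py (text : String) (out : String) : Prop := out = mask_phone_numbers_py_alt text
instance (text : String) (out : String) : Decidable (Spec_mask_phone_numbers_py text out) := by unfold Spec_mask_phone_numbers_py; infer_instance

-- ===== CLAIM (what is proved, stated in full; the proofs are below) =====
def Claim_equal_mask_phone_numbers_py : Prop := ∀ (text : String), Dom_mask_phone_numbers_py text → Spec_mask_phone_numbers_py text (mask_phone_numbers_py text)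

-- ===== LEMMAS AND PROOFS =====

theorem pvMask_eq (run : List Char) : pvMaskTokenA run = pvMaskRunB run := rfl

theorem pvTakeWhile_all_append {p : Char → Bool} (l m : List Char)
    (h : ∀ c ∈ l, p c = true) : (l ++ m).takeWhile p = l ++ m.takeWhile p := by
  induction l with
  | nil => simp
  | cons d l' ih =>
    have hd := h d (by simp)
    simp [hd, ih (fun c hc => h c (by simp [hc]))]

theorem pvDropWhile_all_append {p : Char → Bool} (l m : List Char)
    (h : ∀ c ∈ l, p c = true) : (l ++ m).dropWhile p = m.dropWhile p := by
  induction l with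
  | nil => simp
  | cons d l' ih =>
    have hd := h d (by simp)
    simp [hd, ih (fun c hc => h c (by simp [hc]))]

-- Invariant: with cur a list of phone chars, A's loop from state (out, cur)
-- produces out ++ B's result on cur ++ cs.
theorem pvGo_inv (cs : List Char) : ∀ (out cur : List Char),
    (∀ c ∈ cur, pvIsPhone c = true) →
    pvGoA cs out cur = out ++ pvGoB (cur ++ cs) := by
  induction cs with
  | nil =>
    intro out cur hcur
    cases cur with
    | nil => simp [pvGoA, pvGoB]
    | cons d cur' =>
      have hd : pvIsPhone d = true := hcur d (by simp)
      have htw : (cur').takeWhile pvIsPhone = cur' :=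
        List.takeWhile_eq_self_iff.mpr (fun c hc => hcur c (by simp [hc]))
      have hdw : (cur').dropWhile pvIsPhone = [] :=
        List.dropWhile_eq_nil_iff.mpr (fun c hc => hcur c (by simp [hc]))
      simp [pvGoA, pvGoB, hd, htw, hdw, pvMask_eq]
  | cons c rest ih =>
    intro out cur hcur
    by_cases hc : pvIsPhone c = true
    · have step : pvGoA (c :: rest) out cur = pvGoA rest out (cur ++ [c]) := by
        simp [pvGoA, hc]
      rw [step, ih out (cur ++ [c]) (by
        intro x hx
        rcases List.mem_append.mp hx with h | h
        · exact hcur x h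
        · simp at h; simpa [h] using hc)]
      simp
    · have hc' : pvIsPhone c = false := by simpa using hc
      cases cur with
      | nil =>
        have step : pvGoA (c :: rest) out [] = pvGoA rest (out ++ [c]) [] := by
          simp [pvGoA, hc']
        rw [step, ih (out ++ [c]) [] (by simp)]
        simp [pvGoB, hc']
      | cons d cur' =>
        have hd : pvIsPhone d = true := hcur d (by simp)
        have hcur' : ∀ x ∈ cur', pvIsPhone x = true := fun x hx => hcur x (by simp [hx])
        have step : pvGoA (c :: rest) out (d :: cur') =
            pvGoA rest (out ++ pvMaskTokenA (d :: cur') ++ [c]) [] := by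
          simp [pvGoA, hc']
        rw [step, ih (out ++ pvMaskTokenA (d :: cur') ++ [c]) [] (by simp)]
        have htw : (cur' ++ c :: rest).takeWhile pvIsPhone = cur' := by
          rw [pvTakeWhile_all_append cur' (c :: rest) hcur']
          simp [hc']
        have hdw : (cur' ++ c :: rest).dropWhile pvIsPhone = c :: rest := by
          rw [pvDropWhile_all_append cur' (c :: rest) hcur']
          simp [hc']
        have hB : pvGoB (d :: (cur' ++ c :: rest)) =
            pvMaskRunB (d :: cur') ++ c :: pvGoB rest := by
          rw [pvGoB]
          simp [hd, htw, hdw, pvGoB, hc']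
        simp [hB, pvMask_eq]

-- ===== VERDICT (by name: the statement is the Claim_ definition above) =====
theorem mask_phone_numbers_py_spec : Claim_equal_mask_phone_numbers_py := by
  intro text _
  unfold Spec_mask_phone_numbers_py mask_phone_numbers_py mask_phone_numbers_py_alt
  rw [pvGo_inv text.toList [] [] (by simp)]
  simp
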